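-- pv_equiv track=rewrite | github.com/Trifase/AOC2022 | 08.py | get_arms
-- ===== SOURCE A (Python) =====
-- def get_arms(coord: tuple[int, int], data: list[str]) -> list[list[int]]:
--     """
--     This will return a list of four list (arms), each containing the value of all the trees in all 4 directions, origin not included, ordered towards the edges.
--     """
--     y = coord[0]
--     x = coord[1]
--
--     MAX_Y = len(data)
--     MAX_X = len(data[0])
--
--     top = [data[n][x] for n in range(0, y)]
--     bottom = [data[n][x] for n in range(y + 1, MAX_Y)]
--     left = [data[y][n] for n in range(0, x)]
--     right = [data[y][n] for n in range(x + 1, MAX_X)]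
--
--     return [list(reversed(top)), bottom, list(reversed(left)), right]
-- ===== SOURCE B (Python) =====
-- def get_arms(coord: tuple[int, int], data: list[str]) -> list[list[int]]:
--     """
--     This will return a list of four list (arms), each containing the value of all the trees in all 4 directions, origin not included, ordered towards the edges.
--     """
--     y, x = coord
--     max_y = len(data)
--     max_x = len(data[0])
--
--     top, bottom, left, right = [], [], [], []
--     d = 1
--     while True:
--         hit = False
--         if d <= y:
--             top.append(data[y - d][x])
--             hit = True
--         if d < max_y - y:
--             bottom.append(data[y + d][x])
--             hit = True
--         if d <= x:
--             left.append(data[y][x - d])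
--             hit = True
--         if d < max_x - x:
--             right.append(data[y][x + d])
--             hit = True
--         if not hit:
--             return [top, bottom, left, right]
--         d += 1
-- ===== Notes on version B (the rewrite author's own statement) =====
-- stated objective: alternative
-- what changed: B replaces A's four inward range-comprehensions plus two reversed() passes by a single expanding-distance loop that, at each distance d, appends the d-th tree of every arm that still reaches the grid, building all four arms simultaneously and already ordered outward.
import Mathlib
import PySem

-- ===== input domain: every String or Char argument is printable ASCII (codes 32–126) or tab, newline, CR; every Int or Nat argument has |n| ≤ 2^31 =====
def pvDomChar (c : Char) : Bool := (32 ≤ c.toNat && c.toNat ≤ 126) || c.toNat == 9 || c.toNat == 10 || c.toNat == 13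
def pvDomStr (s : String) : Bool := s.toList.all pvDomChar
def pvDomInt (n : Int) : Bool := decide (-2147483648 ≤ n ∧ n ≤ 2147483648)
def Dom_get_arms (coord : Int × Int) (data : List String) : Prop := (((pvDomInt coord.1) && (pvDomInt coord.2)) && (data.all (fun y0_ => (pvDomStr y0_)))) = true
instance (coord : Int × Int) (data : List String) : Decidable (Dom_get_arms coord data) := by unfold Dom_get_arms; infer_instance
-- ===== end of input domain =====

-- B grows all four arms simultaneously in ONE expanding-distance loop, appending outward (no
-- reversed(), no per-arm index ranges), instead of A's four range-comprehensions; same cost.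


-- ===== PORT A =====
-- shared accessor: the expression `data[n][x]` (a one-character string) appearing verbatim in
-- both Pythons; the pyGetD defaults are only reached outside Pre_get_arms
def pvCell (data : List String) (n x : Int) : String :=
  String.ofList [PySem.List.pyGetD (PySem.List.pyGetD data n "").toList x ' ']

def get_arms (coord : Int × Int) (data : List String) : List (List String) :=
  let y := coord.1
  let x := coord.2
  let MAX_Y : Int := PySem.List.len data
  let MAX_X : Int := PySem.Str.len (PySem.List.pyGetD data 0 "")
  let top := (PySem.List.pyRange 0 y 1).map (fun n => pvCell data n x)
  let bottom := (PySem.List.pyRange (y + 1) MAX_Y 1).map (fun n => pvCell data n x)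
  let left := (PySem.List.pyRange 0 x 1).map (fun n => pvCell data y n)
  let right := (PySem.List.pyRange (x + 1) MAX_X 1).map (fun n => pvCell data y n)
  [top.reverse, bottom, left.reverse, right]

-- ===== PORT B =====
-- Source B's while-loop: at distance d, extend every arm whose ray still reaches a tree, then d += 1;
-- stop when no arm was hit (the Nat fuel only makes the loop structurally total: it is chosen
-- large enough below that the loop always stops on its own condition first)
def pvRing (data : List String) (y x max_y max_x : Int) :
    Nat → Int → List String → List String → List String → List String → List (List String)
  | 0, _, top, bottom, left, right => [top, bottom, left, right]
  | fuel + 1, d, top, bottom, left, right =>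
    if d ≤ y ∨ d < max_y - y ∨ d ≤ x ∨ d < max_x - x then
      pvRing data y x max_y max_x fuel (d + 1)
        (if d ≤ y then top ++ [pvCell data (y - d) x] else top)
        (if d < max_y - y then bottom ++ [pvCell data (y + d) x] else bottom)
        (if d ≤ x then left ++ [pvCell data y (x - d)] else left)
        (if d < max_x - x then right ++ [pvCell data y (x + d)] else right)
    else [top, bottom, left, right]

def get_arms_alt (coord : Int × Int) (data : List String) : List (List String) :=
  let y := coord.1
  let x := coord.2
  let max_y : Int := PySem.List.len data
  let max_x : Int := PySem.Str.len (PySem.List.pyGetD data 0 "")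
  pvRing data y x max_y max_x (max (max y (max_y - y - 1)) (max x (max_x - x - 1))).toNat 1 [] [] [] []

-- ===== PRECONDITION & SPEC =====
-- Pre_ is exactly the closed-form description of the inputs on which the Python A returns
-- normally (data nonempty for len(data[0]); every cell the four comprehensions touch — including
-- Python's negative-index wraparound accesses — within range; the row data[y] only required to
-- exist when the left/right comprehensions actually touch it).
def Pre_get_arms (coord : Int × Int) (data : List String) : Prop :=
  data ≠ [] ∧
  coord.1 ≤ (data.length : Int) ∧
  (∀ k ∈ List.range coord.1.toNat,
      PySem.Raise.InRange (data.getD k "").toList.length coord.2) ∧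
  (coord.1 + 1 < (data.length : Int) → -(data.length : Int) ≤ coord.1 + 1) ∧
  (∀ k ∈ List.range ((data.length : Int) - (coord.1 + 1)).toNat,
      PySem.Raise.InRange data.length (coord.1 + 1 + k) ∧
      PySem.Raise.InRange (PySem.List.pyGetD data (coord.1 + 1 + k) "").toList.length coord.2) ∧
  (0 < coord.2 →
      PySem.Raise.InRange data.length coord.1 ∧
      coord.2 ≤ ((PySem.List.pyGetD data coord.1 "").toList.length : Int)) ∧
  (coord.2 + 1 < ((PySem.List.pyGetD data 0 "").toList.length : Int) →
      PySem.Raise.InRange data.length coord.1 ∧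
      -(((PySem.List.pyGetD data coord.1 "").toList.length : Int)) ≤ coord.2 + 1 ∧
      ∀ k ∈ List.range (((PySem.List.pyGetD data 0 "").toList.length : Int) - (coord.2 + 1)).toNat,
        PySem.Raise.InRange (PySem.List.pyGetD data coord.1 "").toList.length (coord.2 + 1 + k))
instance (coord : Int × Int) (data : List String) : Decidable (Pre_get_arms coord data) := by
  unfold Pre_get_arms; infer_instance

def pvWitness_get_arms : (Int × Int) × List String := ((1, 1), ["abc", "def", "ghi"])

def Spec_get_arms (coord : Int × Int) (data : List String) (out : List (List String)) : Prop := out = get_arms_alt coord data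
instance (coord : Int × Int) (data : List String) (out : List (List String)) : Decidable (Spec_get_arms coord data out) := by unfold Spec_get_arms; infer_instance

-- ===== CLAIM (what is proved, stated in full; the proofs are below) =====
def Claim_equal_get_arms : Prop := ∀ (coord : Int × Int) (data : List String), Dom_get_arms coord data → Pre_get_arms coord data → Spec_get_arms coord data (get_arms coord data)

-- ===== LEMMAS AND PROOFS =====

-- the ring loop from distance d appends, to each accumulator, its remaining outward arm
-- (given enough fuel for every arm to run out on its own)
lemma ring_spec (data : List String) (y x max_y max_x : Int) (fuel : Nat) :
    ∀ (d : Int) (T B L R : List String),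
      y + 1 - d ≤ (fuel : Int) → max_y - y - d ≤ (fuel : Int) →
      x + 1 - d ≤ (fuel : Int) → max_x - x - d ≤ (fuel : Int) →
    pvRing data y x max_y max_x fuel d T B L R =
      [T ++ (PySem.List.pyRange d (y + 1) 1).map (fun e => pvCell data (y - e) x),
       B ++ (PySem.List.pyRange d (max_y - y) 1).map (fun e => pvCell data (y + e) x),
       L ++ (PySem.List.pyRange d (x + 1) 1).map (fun e => pvCell data y (x - e)),
       R ++ (PySem.List.pyRange d (max_x - x) 1).map (fun e => pvCell data y (x + e))] := by
  induction fuel with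
  | zero =>
      intro d T B L R h1 h2 h3 h4
      rw [PySem.List.pyRange_one_eq_nil (show y + 1 ≤ d by omega),
        PySem.List.pyRange_one_eq_nil (show max_y - y ≤ d by omega),
        PySem.List.pyRange_one_eq_nil (show x + 1 ≤ d by omega),
        PySem.List.pyRange_one_eq_nil (show max_x - x ≤ d by omega)]
      simp [pvRing]
  | succ n ih =>
      intro d T B L R h1 h2 h3 h4
      simp only [pvRing]
      by_cases hcond : d ≤ y ∨ d < max_y - y ∨ d ≤ x ∨ d < max_x - x
      · rw [if_pos hcond,
          ih (d + 1) _ _ _ _ (by omega) (by omega) (by omega) (by omega)]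
        simp only [List.cons.injEq, and_true]
        refine ⟨?_, ?_, ?_, ?_⟩
        · split_ifs with hc
          · rw [PySem.List.pyRange_one_cons (show d < y + 1 by omega)]; simp
          · rw [PySem.List.pyRange_one_eq_nil (show y + 1 ≤ d by omega),
              PySem.List.pyRange_one_eq_nil (show y + 1 ≤ d + 1 by omega)]
        · split_ifs with hc
          · rw [PySem.List.pyRange_one_cons (show d < max_y - y by omega)]; simp
          · rw [PySem.List.pyRange_one_eq_nil (show max_y - y ≤ d by omega),
              PySem.List.pyRange_one_eq_nil (show max_y - y ≤ d + 1 by omega)]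
        · split_ifs with hc
          · rw [PySem.List.pyRange_one_cons (show d < x + 1 by omega)]; simp
          · rw [PySem.List.pyRange_one_eq_nil (show x + 1 ≤ d by omega),
              PySem.List.pyRange_one_eq_nil (show x + 1 ≤ d + 1 by omega)]
        · split_ifs with hc
          · rw [PySem.List.pyRange_one_cons (show d < max_x - x by omega)]; simp
          · rw [PySem.List.pyRange_one_eq_nil (show max_x - x ≤ d by omega),
              PySem.List.pyRange_one_eq_nil (show max_x - x ≤ d + 1 by omega)]
      · rw [if_neg hcond]
        rw [PySem.List.pyRange_one_eq_nil (show y + 1 ≤ d by omega),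
          PySem.List.pyRange_one_eq_nil (show max_y - y ≤ d by omega),
          PySem.List.pyRange_one_eq_nil (show x + 1 ≤ d by omega),
          PySem.List.pyRange_one_eq_nil (show max_x - x ≤ d by omega)]
        simp

-- A's inward comprehension over range(0, b), reversed, is the outward arm at distances 1..b
lemma rev_map_range (f : Int → String) (b : Int) :
    ((PySem.List.pyRange 0 b 1).map f).reverse =
      (PySem.List.pyRange 1 (b + 1) 1).map (fun e => f (b - e)) := by
  refine List.ext_getElem (by simp only [List.length_reverse, List.length_map,
    PySem.List.length_pyRange_one]; omega) ?_
  intro i h1 h2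
  simp only [List.length_map, PySem.List.length_pyRange_one] at h1 h2
  rw [List.getElem_reverse, List.getElem_map, List.getElem_map,
    PySem.List.getElem_pyRange_one, PySem.List.getElem_pyRange_one]
  congr 1
  simp only [List.length_map, PySem.List.length_pyRange_one]
  omega

-- A's comprehension over range(a+1, b) is the outward arm at distances 1..(b-a-1)
lemma shift_map_range (f : Int → String) (a b : Int) :
    (PySem.List.pyRange (a + 1) b 1).map f =
      (PySem.List.pyRange 1 (b - a) 1).map (fun e => f (a + e)) := by
  refine List.ext_getElem (by simp only [List.length_map,
    PySem.List.length_pyRange_one]; omega) ?_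
  intro i h1 h2
  rw [List.getElem_map, List.getElem_map,
    PySem.List.getElem_pyRange_one, PySem.List.getElem_pyRange_one]
  congr 1
  omega

-- ===== VERDICT (by name: the statement is the Claim_ definition above) =====
theorem get_arms_spec : Claim_equal_get_arms := by
  intro coord data _hDom _hPre
  unfold Spec_get_arms
  simp only [get_arms, get_arms_alt]
  have h1 : coord.1 ≤ max (max coord.1 (PySem.List.len data - coord.1 - 1))
      (max coord.2 (PySem.Str.len (PySem.List.pyGetD data 0 "") - coord.2 - 1)) :=
    le_trans (le_max_left _ _) (le_max_left _ _)
  have h2 : PySem.List.len data - coord.1 - 1 ≤ max (max coord.1 (PySem.List.len data - coord.1 - 1))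
      (max coord.2 (PySem.Str.len (PySem.List.pyGetD data 0 "") - coord.2 - 1)) :=
    le_trans (le_max_right _ _) (le_max_left _ _)
  have h3 : coord.2 ≤ max (max coord.1 (PySem.List.len data - coord.1 - 1))
      (max coord.2 (PySem.Str.len (PySem.List.pyGetD data 0 "") - coord.2 - 1)) :=
    le_trans (le_max_left _ _) (le_max_right _ _)
  have h4 : PySem.Str.len (PySem.List.pyGetD data 0 "") - coord.2 - 1 ≤
      max (max coord.1 (PySem.List.len data - coord.1 - 1))
      (max coord.2 (PySem.Str.len (PySem.List.pyGetD data 0 "") - coord.2 - 1)) :=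
    le_trans (le_max_right _ _) (le_max_right _ _)
  have h5 := Int.self_le_toNat (max (max coord.1 (PySem.List.len data - coord.1 - 1))
      (max coord.2 (PySem.Str.len (PySem.List.pyGetD data 0 "") - coord.2 - 1)))
  rw [ring_spec data coord.1 coord.2 (PySem.List.len data)
      (PySem.Str.len (PySem.List.pyGetD data 0 "")) _ 1 [] [] [] []
      (by omega) (by omega) (by omega) (by omega)]
  rw [rev_map_range (fun n => pvCell data n coord.2) coord.1,
    shift_map_range (fun n => pvCell data n coord.2) coord.1,
    rev_map_range (fun n => pvCell data coord.1 n) coord.2,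
    shift_map_range (fun n => pvCell data coord.1 n) coord.2]
  simp
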